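-- pv_equiv track=rewrite | github.com/Marco0201/Codewars | 8kyu/Sum of differences in array.py | sum_of_differences
-- ===== SOURCE A (Python) =====
-- def sum_of_differences(arr):
--     arr.sort()
--     a = arr[::-1]
--     num = 0
--     l = 0
--     r = 1
--     while r <= len(a) - 1:
--         num += a[l] - a[r]
--         l += 1
--         r += 1
--
--     return num
-- ===== SOURCE B (Python) =====
-- def sum_of_differences(arr):
--     return max(arr) - min(arr) if len(arr) >= 2 else 0
-- ===== Notes on version B (the rewrite author's own statement) =====
-- stated objective: faster
-- what changed: The sort-reverse-and-sum-adjacent-differences loop telescopes to max(arr) - min(arr) (0 for fewer than two elements), computed in one pass without sorting; note A sorts arr in place while B does not mutate it.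
import Mathlib
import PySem

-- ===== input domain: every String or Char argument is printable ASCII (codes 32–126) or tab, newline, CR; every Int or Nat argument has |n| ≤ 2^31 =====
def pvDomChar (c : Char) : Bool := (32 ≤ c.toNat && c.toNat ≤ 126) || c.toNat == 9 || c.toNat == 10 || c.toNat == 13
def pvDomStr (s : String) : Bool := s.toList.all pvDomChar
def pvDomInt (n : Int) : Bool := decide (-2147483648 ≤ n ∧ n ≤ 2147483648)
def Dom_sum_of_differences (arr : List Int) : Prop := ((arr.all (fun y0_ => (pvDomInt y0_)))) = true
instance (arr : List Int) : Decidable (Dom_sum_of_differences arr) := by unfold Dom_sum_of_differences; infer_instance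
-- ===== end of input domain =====

-- B replaces A's sort + adjacent-difference loop by the telescoped max(arr) - min(arr) (0 for < 2 elements);
-- equivalence is about the RETURN value only: Python A sorts arr in place, B does not mutate it.

-- ===== PORT A =====
-- the while loop: 'while r <= len(a) - 1: num += a[l] - a[r]; l += 1; r += 1'
-- (l and r are always in range when read, so getD's default is never used)
def sodLoop (a : List Int) (num : Int) (l r : Nat) : Int :=
  if r + 1 ≤ a.length then
    sodLoop a (num + (a.getD l 0 - a.getD r 0)) (l + 1) (r + 1)
  else num
termination_by a.length - r

def sum_of_differences (arr : List Int) : Int :=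
  -- arr.sort(); a = arr[::-1]; num = 0; l = 0; r = 1; while …
  let a := (PySem.List.sorted arr (fun x => x) false).reverse
  sodLoop a 0 0 1

-- ===== PORT B =====
def sum_of_differences_alt (arr : List Int) : Int :=
  if arr.length ≥ 2 then
    (match PySem.List.max? arr (fun x => x), PySem.List.min? arr (fun x => x) with
     | some mx, some mn => mx - mn
     | _, _ => 0)
  else 0

-- ===== PRECONDITION & SPEC =====
def Spec_sum_of_differences (arr : List Int) (out : Int) : Prop := out = sum_of_differences_alt arr
instance (arr : List Int) (out : Int) : Decidable (Spec_sum_of_differences arr out) := by unfold Spec_sum_of_differences; infer_instance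

-- ===== CLAIM (what is proved, stated in full; the proofs are below) =====
def Claim_equal_sum_of_differences : Prop := ∀ (arr : List Int), Dom_sum_of_differences arr → Spec_sum_of_differences arr (sum_of_differences arr)

-- ===== LEMMAS AND PROOFS =====

-- the loop telescopes: starting at adjacent indices l, l+1 it adds a[l] - a[last]
theorem sodLoop_telescope (a : List Int) (num : Int) (l : Nat)
    (h : l + 1 ≤ a.length) :
    sodLoop a num l (l + 1) = num + (a.getD l 0 - a.getD (a.length - 1) 0) := by
  by_cases h2 : l + 2 ≤ a.length
  · rw [sodLoop]
    simp only [h2, if_pos]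
    rw [sodLoop_telescope a _ (l + 1) h2]
    ring
  · have hlen : a.length = l + 1 := by omega
    rw [sodLoop]
    have hno : ¬ (l + 1 + 1 ≤ a.length) := by omega
    simp only [hno, if_neg, not_false_iff]
    rw [hlen]
    simp
termination_by a.length - l

theorem sum_of_differences_spec : Claim_equal_sum_of_differences := by
  unfold Claim_equal_sum_of_differences
  intro arr _
  unfold Spec_sum_of_differences sum_of_differences sum_of_differences_alt
  have hslen : (PySem.List.sorted arr (fun x => x) false).length = arr.length :=
    PySem.List.length_sorted ..
  by_cases h2 : arr.length ≥ 2
  · -- the loop telescopes to a[0] - a[len-1] on the reversed sorted list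
    rw [show (1 : Nat) = 0 + 1 from rfl,
        sodLoop_telescope _ _ _ (by simp only [List.length_reverse, hslen]; omega)]
    have hlt1 : arr.length - 1 < (PySem.List.sorted arr (fun x => x) false).length := by omega
    have hlt0 : 0 < (PySem.List.sorted arr (fun x => x) false).length := by omega
    have hg0 : (PySem.List.sorted arr (fun x => x) false).reverse.getD 0 0
        = (PySem.List.sorted arr (fun x => x) false)[arr.length - 1]'hlt1 := by
      rw [List.getD_eq_getElem _ _ (by simp only [List.length_reverse]; omega)]
      simp only [List.getElem_reverse]
      congr 1
      omega
    have hg1 : (PySem.List.sorted arr (fun x => x) false).reverse.getD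
          ((PySem.List.sorted arr (fun x => x) false).reverse.length - 1) 0
        = (PySem.List.sorted arr (fun x => x) false)[0]'hlt0 := by
      rw [List.getD_eq_getElem _ _ (by simp only [List.length_reverse]; omega)]
      simp only [List.getElem_reverse, List.length_reverse]
      congr 1
      omega
    rw [hg0, hg1]
    obtain ⟨mx, hmx⟩ : ∃ mx, PySem.List.max? arr (fun x => x) = some mx := by
      rcases hmax : PySem.List.max? arr (fun x => x) with _ | mx
      · exfalso
        have : arr = [] := (PySem.List.max?_eq_none_iff ..).mp hmax
        rw [this] at h2; simp at h2
      · exact ⟨mx, rfl⟩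
    obtain ⟨mn, hmn⟩ : ∃ mn, PySem.List.min? arr (fun x => x) = some mn := by
      rcases hmin : PySem.List.min? arr (fun x => x) with _ | mn
      · exfalso
        have : arr = [] := (PySem.List.min?_eq_none_iff ..).mp hmin
        rw [this] at h2; simp at h2
      · exact ⟨mn, rfl⟩
    rw [if_pos h2, hmx, hmn]
    -- the last element of the sorted list is the max, the first is the min
    have hmem1 : (PySem.List.sorted arr (fun x => x) false)[arr.length - 1]'hlt1 ∈ arr :=
      (PySem.List.mem_sorted ..).mp (List.getElem_mem _)
    have hmem0 : (PySem.List.sorted arr (fun x => x) false)[0]'hlt0 ∈ arr :=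
      (PySem.List.mem_sorted ..).mp (List.getElem_mem _)
    have e1 : (PySem.List.sorted arr (fun x => x) false)[arr.length - 1]'hlt1 = mx := by
      apply le_antisymm
      · exact PySem.List.max?_isMax hmx _ hmem1
      · have hmxmem : mx ∈ PySem.List.sorted arr (fun x => x) false :=
          (PySem.List.mem_sorted ..).mpr (PySem.List.max?_mem hmx)
        obtain ⟨p, hp, hyp⟩ := List.mem_iff_getElem.mp hmxmem
        have := PySem.List.key_sorted_getElem_mono (xs := arr) (key := fun x => x)
          (p := p) (q := arr.length - 1) (by omega) hlt1
        simp only at this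
        rw [← hyp]
        exact this
    have e0 : (PySem.List.sorted arr (fun x => x) false)[0]'hlt0 = mn := by
      apply le_antisymm
      · have hmnmem : mn ∈ PySem.List.sorted arr (fun x => x) false :=
          (PySem.List.mem_sorted ..).mpr (PySem.List.min?_mem hmn)
        obtain ⟨p, hp, hyp⟩ := List.mem_iff_getElem.mp hmnmem
        have := PySem.List.key_sorted_getElem_mono (xs := arr) (key := fun x => x)
          (p := 0) (q := p) (by omega) hp
        simp only at this
        rw [← hyp]
        exact this
      · exact PySem.List.min?_isMin hmn _ hmem0
    rw [e1, e0]
    ring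
  · -- fewer than two elements: the loop never runs and B returns 0
    rw [sodLoop]
    have hno : ¬ (1 + 1 ≤ (PySem.List.sorted arr (fun x => x) false).reverse.length) := by
      simp only [List.length_reverse, hslen]; omega
    simp only [hno, if_neg, not_false_iff]
    rw [if_neg h2]
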